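-- pv_equiv track=rewrite | github.com/Qhovo1/League-of-LLMs | exp/math_experiment.py | get_current_ranking
-- ===== SOURCE A (Python) =====
-- def get_current_ranking(total_scores):
--     """Calculate current ranking based on total scores"""
--     # Sort by score in descending order
--     sorted_models = sorted(total_scores.items(), key=lambda x: x[1], reverse=True)
--
--     # Handle tied scores
--     ranking = []
--     current_rank = 1
--     current_score = None
--     tied_count = 0
--
--     for i, (model_name, score) in enumerate(sorted_models):
--         if score != current_score:
--             current_rank = i + 1
--             current_score = score
--             tied_count = 0
--         else:
--             tied_count += 1
--
--         ranking.append((current_rank, model_name, score, tied_count > 0))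
--
--     return ranking
-- ===== SOURCE B (Python) =====
-- def get_current_ranking(total_scores):
--     """Calculate current ranking based on total scores"""
--     items = sorted(total_scores.items(), key=lambda x: x[1], reverse=True)
--
--     def groups(rest, idx):
--         if not rest:
--             return []
--         k = 1
--         while k < len(rest) and rest[k][1] == rest[0][1]:
--             k += 1
--         group, tail = rest[:k], rest[k:]
--         out = [(idx + 1, name, score, pos > 0)
--                for pos, (name, score) in enumerate(group)]
--         return out + groups(tail, idx + k)
--
--     return groups(items, 0)
-- ===== Notes on version B (the rewrite author's own statement) =====
-- stated objective: alternative
-- what changed: Replaces A's flat compare-to-previous scan carrying rank/score/tie-count state with a recursive pass that peels each run of equal scores off the sorted list and emits the whole tie group at once from its start index.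
import Mathlib
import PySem

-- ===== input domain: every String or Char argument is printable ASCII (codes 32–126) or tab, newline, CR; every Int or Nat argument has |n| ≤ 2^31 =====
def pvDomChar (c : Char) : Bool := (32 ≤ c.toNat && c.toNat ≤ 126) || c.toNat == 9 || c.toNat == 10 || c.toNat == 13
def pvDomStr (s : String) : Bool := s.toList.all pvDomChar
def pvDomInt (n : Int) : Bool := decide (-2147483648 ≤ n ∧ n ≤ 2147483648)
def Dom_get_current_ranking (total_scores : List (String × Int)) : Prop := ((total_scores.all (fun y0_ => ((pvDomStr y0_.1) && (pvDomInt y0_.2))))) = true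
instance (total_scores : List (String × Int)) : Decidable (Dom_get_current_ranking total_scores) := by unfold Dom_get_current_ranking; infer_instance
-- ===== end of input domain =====

-- B peels tie groups off the sorted list recursively instead of A's flat scan with carried state; same output, same cost.

-- ===== PORT A =====
-- A's loop body, named so the lemmas can speak about it
def stepA (st : List (Int × String × Int × Bool) × Int × Option Int × Int)
    (ip : Int × String × Int) : List (Int × String × Int × Bool) × Int × Option Int × Int :=
  let ranking := st.1
  let current_rank := st.2.1
  let current_score := st.2.2.1
  let tied_count := st.2.2.2
  let i := ip.1
  let model_name := ip.2.1
  let score := ip.2.2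
  if some score ≠ current_score then
    (ranking ++ [(i + 1, model_name, score, decide ((0:Int) > 0))], i + 1, some score, 0)
  else
    (ranking ++ [(current_rank, model_name, score, decide (tied_count + 1 > 0))],
      current_rank, current_score, tied_count + 1)

def get_current_ranking (total_scores : List (String × Int)) : List (Int × String × Int × Bool) :=
  let sorted_models := PySem.List.sorted total_scores (fun x => x.2) true
  ((PySem.List.enumerate sorted_models).foldl stepA ([], 1, none, 0)).1

-- ===== PORT B =====
def emitGroup (group : List (String × Int)) (idx : Int) : List (Int × String × Int × Bool) :=
  (PySem.List.enumerate group).map (fun q => (idx + 1, q.2.1, q.2.2, decide (q.1 > 0)))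

def groupsB : List (String × Int) → Int → List (Int × String × Int × Bool)
  | [], _ => []
  | p :: rest, idx =>
    let group := p :: rest.takeWhile (fun q => q.2 == p.2)
    let tail := rest.dropWhile (fun q => q.2 == p.2)
    emitGroup group idx ++ groupsB tail (idx + group.length)
termination_by l _ => l.length
decreasing_by
  exact Nat.lt_succ_of_le (List.length_dropWhile_le _ _)

def get_current_ranking_alt (total_scores : List (String × Int)) : List (Int × String × Int × Bool) :=
  groupsB (PySem.List.sorted total_scores (fun x => x.2) true) 0

-- ===== PRECONDITION & SPEC =====
def Spec_get_current_ranking (total_scores : List (String × Int)) (out : List (Int × String × Int × Bool)) : Prop := out = get_current_ranking_alt total_scores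
instance (total_scores : List (String × Int)) (out : List (Int × String × Int × Bool)) : Decidable (Spec_get_current_ranking total_scores out) := by unfold Spec_get_current_ranking; infer_instance

-- ===== CLAIM (what is proved, stated in full; the proofs are below) =====
def Claim_equal_get_current_ranking : Prop := ∀ (total_scores : List (String × Int)), Dom_get_current_ranking total_scores → Spec_get_current_ranking total_scores (get_current_ranking total_scores)

-- ===== LEMMAS AND PROOFS =====

-- a run of ties: with current_score already = s, every element of score s is appended with the current rank and flag true
theorem tie_run (t : List (String × Int)) (s : Int) (hs : ∀ p ∈ t, p.2 = s) :
    ∀ (j : Int) (acc : List (Int × String × Int × Bool)) (r tc : Int), 0 ≤ tc →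
    List.foldl stepA (acc, r, some s, tc) (PySem.List.enumerate t j) =
      (acc ++ t.map (fun p => (r, p.1, p.2, true)), r, some s, tc + t.length) := by
  induction t with
  | nil => intro j acc r tc _; simp [PySem.List.enumerate_nil]
  | cons x xs ih =>
    intro j acc r tc htc
    have hx : x.2 = s := hs x (by simp)
    simp only [PySem.List.enumerate_cons, List.foldl_cons]
    have hstep : stepA (acc, r, some s, tc) (j, x) =
        (acc ++ [(r, x.1, x.2, true)], r, some s, tc + 1) := by
      simp [stepA, hx]
      omega
    rw [hstep, ih (fun p hp => hs p (by simp [hp])) (j+1) _ r (tc+1) (by omega)]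
    simp
    omega

-- entering a fresh group of score s (current_score ≠ some s) emits the whole group from index i
theorem group_run (x : String × Int) (t : List (String × Int)) (ht : ∀ p ∈ t, p.2 = x.2) :
    ∀ (i : Int) (acc : List (Int × String × Int × Bool)) (r : Int) (cs : Option Int) (tc : Int),
    cs ≠ some x.2 → 0 ≤ tc →
    List.foldl stepA (acc, r, cs, tc) (PySem.List.enumerate (x :: t) i) =
      (acc ++ (i + 1, x.1, x.2, false) :: t.map (fun p => (i + 1, p.1, p.2, true)),
        i + 1, some x.2, (t.length : Int)) := by
  intro i acc r cs tc hcs _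
  simp only [PySem.List.enumerate_cons, List.foldl_cons]
  have hstep : stepA (acc, r, cs, tc) (i, x) =
      (acc ++ [(i + 1, x.1, x.2, false)], i + 1, some x.2, 0) := by
    simp [stepA]
    intro h; exact absurd h.symm hcs
  rw [hstep, tie_run t x.2 ht (i+1) _ (i+1) 0 le_rfl]
  simp

-- a group's emitted block, written as B writes it
theorem emitGroup_eq (x : String × Int) (t : List (String × Int)) (i : Int) :
    emitGroup (x :: t) i = (i + 1, x.1, x.2, false) :: t.map (fun p => (i + 1, p.1, p.2, true)) := by
  unfold emitGroup
  rw [PySem.List.enumerate_cons]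
  simp only [List.map_cons]
  congr 1
  have : ∀ (u : List (String × Int)) (j : Int), 1 ≤ j →
      (PySem.List.enumerate u j).map (fun q => (i + 1, q.2.1, q.2.2, decide (q.1 > 0))) =
        u.map (fun p => (i + 1, p.1, p.2, true)) := by
    intro u
    induction u with
    | nil => intro j _; simp [PySem.List.enumerate_nil]
    | cons y ys ih =>
      intro j hj
      rw [PySem.List.enumerate_cons]
      simp only [List.map_cons, ih (j+1) (by omega)]
      congr 2
      simp
      omega
  exact this t 1 le_rfl

-- the flat scan over any list equals the grouped pass, given the entry score differs from current_score
theorem scan_eq_groups (l : List (String × Int)) :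
    ∀ (i : Int) (acc : List (Int × String × Int × Bool)) (r : Int) (cs : Option Int) (tc : Int),
    (∀ p ∈ l.head?, cs ≠ some p.2) → 0 ≤ tc →
    (List.foldl stepA (acc, r, cs, tc) (PySem.List.enumerate l i)).1 = acc ++ groupsB l i := by
  induction hn : l.length using Nat.strong_induction_on generalizing l with
  | _ n ih =>
  match l, hn with
  | [], _ => intro i acc r cs tc _ _; simp [PySem.List.enumerate_nil, groupsB]
  | p :: rest, hn =>
    set group := p :: rest.takeWhile (fun q => q.2 == p.2) with hgroupdef
    set tail := rest.dropWhile (fun q => q.2 == p.2) with htaildef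
    intro i acc r cs tc hcs htc
    have hsplit : p :: rest = group ++ tail := by
      simp only [group, tail, List.cons_append]
      rw [List.takeWhile_append_dropWhile]
    have hgrp : ∀ q ∈ rest.takeWhile (fun q => q.2 == p.2), q.2 = p.2 := by
      intro q hq
      have := List.mem_takeWhile_imp hq
      simpa using this
    have henum : PySem.List.enumerate (p :: rest) i =
        PySem.List.enumerate group i ++ PySem.List.enumerate tail (i + (group.length : Int)) := by
      conv_lhs => rw [hsplit]
      rw [PySem.List.enumerate_append]
    rw [henum, List.foldl_append]
    have hcs' : cs ≠ some p.2 := hcs p (by simp)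
    rw [show group = p :: rest.takeWhile (fun q => q.2 == p.2) from rfl,
        group_run p (rest.takeWhile (fun q => q.2 == p.2)) hgrp i acc r cs tc hcs' htc]
    have htail : ∀ q ∈ tail.head?, (some p.2 : Option Int) ≠ some q.2 := by
      intro q hq
      cases htl : tail with
      | nil => simp [htl] at hq
      | cons y ys =>
        rw [htl] at hq; simp at hq; subst hq
        have : ¬ ((fun q : String × Int => q.2 == p.2) y) := by
          have := List.head?_dropWhile_not (fun q : String × Int => q.2 == p.2) rest
          rw [show rest.dropWhile (fun q => q.2 == p.2) = tail from rfl, htl] at this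
          simpa using this
        simp at this
        simp
        omega
    have hlt : tail.length < n := by
      have := List.length_dropWhile_le (fun q : String × Int => q.2 == p.2) rest
      simp only [htaildef]
      rw [← hn]
      simp only [List.length_cons]
      omega
    rw [ih tail.length hlt tail rfl (i + (group.length : Int)) _ (i+1) (some p.2) (rest.takeWhile (fun q => q.2 == p.2)).length htail (by positivity)]
    conv_rhs => rw [groupsB.eq_def]
    simp only [hgroupdef, htaildef]
    rw [emitGroup_eq]
    simp

-- ===== VERDICT (by name: the statement is the Claim_ definition above) =====
theorem get_current_ranking_spec : Claim_equal_get_current_ranking := by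
  intro ts _
  unfold Spec_get_current_ranking get_current_ranking get_current_ranking_alt
  rw [scan_eq_groups _ 0 [] 1 none 0 (by simp) le_rfl]
  simp
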